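-- pv_equiv track=rewrite | github.com/apedley/keyboards | util/ctojson.py | between_parens
-- ===== SOURCE A (Python) =====
-- def between_parens(test_str):
--     test_str=test_str.replace("(","*(")
--     test_str=test_str.replace(")",")*")
--     x=test_str.split("*")
--     res=[]
--     for i in x:
--         if i.startswith("(") and i.endswith(")"):
--             res.append(i)
--     return res
-- ===== SOURCE B (Python) =====
-- def between_parens(test_str):
--     # single left-to-right scan: remember the most recent '(', emit the token
--     # when the next ')' arrives
--     res = []
--     cur = None
--     for ch in test_str:
--         if ch == '(':
--             cur = '('
--         elif ch == ')':
--             if cur is not None: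
--                 res.append(cur + ')')
--                 cur = None
--         elif cur is not None:
--             cur += ch
--     return res
-- ===== Notes on version B (the rewrite author's own statement) =====
-- stated objective: alternative
-- what changed: Replaced the insert-'*'-delimiters/replace/split/filter pipeline (three intermediate strings plus a fragment list) by a single left-to-right scan that remembers the most recent '(' and emits the token at the next ')'; Pre_ excludes strings in which a '*' occurs between a '(' and a ')' with no other parenthesis in between, where the pre-existing asterisk collides with the split delimiter A inserts and either reading of the token is defensible.
-- outside the precondition, e.g. on between_parens('(a*b)'): A returns [], B returns ['(a*b)']
import Mathlib
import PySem

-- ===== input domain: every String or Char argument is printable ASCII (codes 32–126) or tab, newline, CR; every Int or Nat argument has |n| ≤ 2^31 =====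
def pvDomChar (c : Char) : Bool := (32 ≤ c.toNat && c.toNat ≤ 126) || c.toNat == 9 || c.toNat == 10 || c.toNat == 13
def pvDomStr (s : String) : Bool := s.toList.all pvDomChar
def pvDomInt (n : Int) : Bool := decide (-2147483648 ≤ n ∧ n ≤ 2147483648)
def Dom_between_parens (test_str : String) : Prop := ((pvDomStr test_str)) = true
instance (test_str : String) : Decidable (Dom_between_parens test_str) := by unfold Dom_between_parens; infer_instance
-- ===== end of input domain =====

-- B replaces A's replace/replace/split/filter pipeline by a single left-to-right
-- scan that remembers the most recent '(' and emits the token at the next ')';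
-- Pre_ excludes strings where a pre-existing '*' collides with A's delimiter.

-- ===== PORT A =====
def between_parens (test_str : String) : List String :=
  let t1 := PySem.Str.replace test_str "(" "*("
  let t2 := PySem.Str.replace t1 ")" ")*"
  let x := (PySem.Str.split? t2 "*").getD []   -- sep "*" is nonempty, so split? is always `some`
  x.foldl (fun res i =>
    if PySem.Str.startswith i "(" && PySem.Str.endswith i ")" then res ++ [i] else res) []

-- ===== PORT B =====
def bpStep (st : List String × Option (List Char)) (ch : Char) :
    List String × Option (List Char) :=
  if ch = '(' then (st.1, some ['('])
  else if ch = ')' then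
    match st.2 with
    | some b => (st.1 ++ [String.ofList (b ++ [')'])], none)
    | none => st
  else
    match st.2 with
    | some b => (st.1, some (b ++ [ch]))
    | none => st

def between_parens_alt (test_str : String) : List String :=
  (test_str.toList.foldl bpStep ([], none)).1

-- ===== PRECONDITION & SPEC =====
-- Pre_ excludes strings in which a '*' occurs strictly between a '(' and a ')'
-- with no other parenthesis in between: there the '*' split delimiter that A
-- inserts around parentheses collides with the pre-existing asterisk, so A
-- drops that token (A('(a*b)') = []) while B's scanner keeps it (['(a*b)']) —
-- an unspecified corner on which either reading is defensible.
def Pre_between_parens (test_str : String) : Prop :=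
  ¬ ∃ k < test_str.toList.length, ∃ i < k,
    test_str.toList.getD i ' ' = '(' ∧ test_str.toList.getD k ' ' = ')' ∧
    '*' ∈ (test_str.toList.drop (i+1)).take (k-i-1) ∧
    '(' ∉ (test_str.toList.drop (i+1)).take (k-i-1) ∧
    ')' ∉ (test_str.toList.drop (i+1)).take (k-i-1)
instance (test_str : String) : Decidable (Pre_between_parens test_str) := by
  unfold Pre_between_parens; infer_instance

def pvWitness_between_parens : String := "a (bc) *d(e)"

def Spec_between_parens (test_str : String) (out : List String) : Prop := out = between_parens_alt test_str
instance (test_str : String) (out : List String) : Decidable (Spec_between_parens test_str out) := by unfold Spec_between_parens; infer_instance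

-- ===== CLAIM (what is proved, stated in full; the proofs are below) =====
def Claim_equal_between_parens : Prop := ∀ (test_str : String), Dom_between_parens test_str → Pre_between_parens test_str → Spec_between_parens test_str (between_parens test_str)

-- ===== LEMMAS AND PROOFS =====

-- old-style scanner used only as a stepping stone in the proof: it abandons the
-- current token on '*', which is exactly what A's split-on-'*' does
def oldStep (st : List String × Option (List Char)) (ch : Char) :
    List String × Option (List Char) :=
  if ch = '(' then (st.1, some ['('])
  else if ch = ')' then
    match st.2 with
    | some b => (st.1 ++ [String.ofList (b ++ [')'])], none)
    | none => st
  else if ch = '*' then (st.1, none)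
  else
    match st.2 with
    | some b => (st.1, some (b ++ [ch]))
    | none => st

-- the char-level expansion performed by A's two `replace` calls
def pvT (c : Char) : List Char :=
  if c = '(' then ['*', '('] else if c = ')' then [')', '*'] else [c]

-- A's split("*"), written as plain structural recursion (cur = current fragment, reversed)
def pvSplit1 (cur : List Char) : List Char → List (List Char)
  | [] => [cur.reverse]
  | c :: t => if c = '*' then cur.reverse :: pvSplit1 [] t else pvSplit1 (c :: cur) t

def pvKeep (p : List Char) : Bool := ['('].isPrefixOf p && [')'].isSuffixOf p

lemma pv_replace_single (o : Char) (new : List Char) (l : List Char) :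
    PySem.Chars.replace l [o] new
      = l.flatMap (fun c => if c = o then new else [c]) := by
  have go : ∀ (fuel : Nat) (l acc : List Char), l.length ≤ fuel →
      PySem.Chars.replace.go [o] new fuel l acc
        = acc.reverse ++ l.flatMap (fun c => if c = o then new else [c]) := by
    intro fuel
    induction fuel with
    | zero =>
      intro l acc h
      have : l = [] := List.length_eq_zero_iff.mp (Nat.le_zero.mp h)
      subst this; simp [PySem.Chars.replace.go]
    | succ n ih =>
      intro l acc h
      match l with
      | [] => simp [PySem.Chars.replace.go]
      | c :: t =>
        rw [PySem.Chars.replace.go]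
        simp only [List.isPrefixOf, List.flatMap_cons]
        by_cases hc : c = o
        · subst hc
          simp [ih t (new.reverse ++ acc) (by simpa using h)]
        · have : (o == c) = false := by simp [Ne.symm hc]
          simp [this, hc, ih t (c :: acc) (by simpa using h)]
  rw [PySem.Chars.replace]
  simp [go l.length l [] le_rfl]

lemma pv_split_go (fuel : Nat) :
    ∀ (l cur : List Char) (acc : List (List Char)), l.length ≤ fuel →
      PySem.Chars.splitOn.go ['*'] fuel l cur acc = acc.reverse ++ pvSplit1 cur l := by
  induction fuel with
  | zero =>
    intro l cur acc h
    have : l = [] := List.length_eq_zero_iff.mp (Nat.le_zero.mp h)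
    subst this; simp [PySem.Chars.splitOn.go, pvSplit1]
  | succ n ih =>
    intro l cur acc h
    match l with
    | [] => simp [PySem.Chars.splitOn.go, pvSplit1]
    | c :: t =>
      rw [PySem.Chars.splitOn.go]
      simp only [List.isPrefixOf]
      by_cases hc : c = '*'
      · subst hc
        simp [ih t [] (cur.reverse :: acc) (by simpa using h), pvSplit1]
      · have : ('*' == c) = false := by simp [Ne.symm hc]
        simp [this, hc, ih t (c :: cur) acc (by simpa using h), pvSplit1]

lemma pv_singleton_isPrefixOf (a : Char) (l : List Char) :
    [a].isPrefixOf l = true ↔ l.head? = some a := by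
  cases l with
  | nil => simp [List.isPrefixOf]
  | cons c t =>
    constructor
    · intro h
      have : a = c := by simpa [List.isPrefixOf] using h
      simp [this]
    · intro h
      have : c = a := by simpa using h
      simp [List.isPrefixOf, this]

lemma pv_keep_iff (p : List Char) :
    pvKeep p = true ↔ p.head? = some '(' ∧ p.getLast? = some ')' := by
  have hsuf : [')'].isSuffixOf p = [')'].isPrefixOf p.reverse := rfl
  show (['('].isPrefixOf p && [')'].isSuffixOf p) = true ↔ _
  rw [Bool.and_eq_true, pv_singleton_isPrefixOf, hsuf, pv_singleton_isPrefixOf,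
    List.head?_reverse]

-- A, reduced to char level
lemma pv_foldl_filter (x : List (List Char)) (res : List String) :
    (x.map String.ofList).foldl (fun res i =>
        if PySem.Str.startswith i "(" && PySem.Str.endswith i ")" then res ++ [i] else res) res
      = res ++ (x.filter pvKeep).map String.ofList := by
  induction x generalizing res with
  | nil => simp
  | cons p t ih =>
    have hs : PySem.Str.startswith (String.ofList p) "(" = ['('].isPrefixOf p := by
      simp [PySem.Str.startswith, PySem.Chars.startswith]
    have he : PySem.Str.endswith (String.ofList p) ")" = [')'].isSuffixOf p := by
      simp [PySem.Str.endswith, PySem.Chars.endswith]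
    rw [List.map_cons, List.foldl_cons, hs, he,
      show (['('].isPrefixOf p && [')'].isSuffixOf p) = pvKeep p from rfl]
    by_cases hk : pvKeep p = true
    · rw [if_pos hk, ih (res ++ [String.ofList p]), List.filter_cons_of_pos hk]
      simp
    · rw [if_neg hk, ih res, List.filter_cons_of_neg (by simpa using hk)]

lemma pv_flatMap_flatMap {α : Type} (l : List α) (f : α → List α) (g : α → List α) :
    (l.flatMap f).flatMap g = l.flatMap (fun x => (f x).flatMap g) := by
  induction l with
  | nil => rfl
  | cons a t ih => simp [List.flatMap_cons, ih]

lemma pv_a_char (s : String) :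
    between_parens s
      = ((pvSplit1 [] (s.toList.flatMap pvT)).filter pvKeep).map String.ofList := by
  have hT : ∀ l : List Char,
      PySem.Chars.replace (PySem.Chars.replace l ['('] ['*','(']) [')'] [')','*']
        = l.flatMap pvT := by
    intro l
    rw [pv_replace_single, pv_replace_single, pv_flatMap_flatMap]
    have : (fun c => (if c = '(' then ['*','('] else [c]).flatMap
        (fun c => if c = ')' then [')','*'] else [c])) = pvT := by
      funext c
      by_cases h1 : c = '(' <;> by_cases h2 : c = ')' <;>
        simp_all [pvT]
    rw [this]
  have hsplit : ∀ l : List Char,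
      PySem.Chars.splitOn l ['*'] = pvSplit1 [] l := by
    intro l
    rw [PySem.Chars.splitOn]
    simpa using pv_split_go (l.length + 1) l [] [] (by omega)
  unfold between_parens
  simp only [PySem.Str.replace, PySem.Str.split?, PySem.Chars.split?, String.toList_ofList]
  rw [show ("(" : String).toList = ['('] from rfl,
    show (")" : String).toList = [')'] from rfl,
    show ("*" : String).toList = ['*'] from rfl,
    show ("*(" : String).toList = ['*', '('] from rfl,
    show (")*" : String).toList = [')', '*'] from rfl,
    hT, hsplit, if_neg (by decide)]
  simpa using pv_foldl_filter (pvSplit1 [] (s.toList.flatMap pvT)) []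

def pvMatch : Option (List Char) → List Char → Prop
  | some b, frag => frag = b.reverse ∧ frag.getLast? = some '(' ∧ frag.head? ≠ some ')'
  | none, frag => frag.getLast? ≠ some '('

lemma pv_gl_cons (a : Char) (l : List Char) :
    (a :: l).getLast? = if l.isEmpty then some a else l.getLast? := by
  cases l <;> simp

lemma pv_keep_rev_false_of_some (frag : List Char)
    (_h1 : frag.getLast? = some '(') (h2 : frag.head? ≠ some ')') :
    pvKeep frag.reverse = false := by
  rw [Bool.eq_false_iff]
  intro hk
  rw [pv_keep_iff] at hk
  exact h2 (by simpa using hk.2)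

lemma pv_keep_rev_false_of_none (frag : List Char)
    (h1 : frag.getLast? ≠ some '(') :
    pvKeep frag.reverse = false := by
  rw [Bool.eq_false_iff]
  intro hk
  rw [pv_keep_iff] at hk
  exact h1 (by simpa using hk.1)

lemma pv_main : ∀ (s : List Char) (res : List String) (b? : Option (List Char))
    (frag : List Char), pvMatch b? frag →
    res ++ ((pvSplit1 frag (s.flatMap pvT)).filter pvKeep).map String.ofList
      = (s.foldl oldStep (res, b?)).1 := by
  intro s
  induction s with
  | nil =>
    intro res b? frag hm
    match b? with
    | some b =>
      obtain ⟨hf, h1, h2⟩ := hm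
      simp [pvSplit1, pv_keep_rev_false_of_some frag h1 h2]
    | none =>
      simp [pvSplit1, pv_keep_rev_false_of_none frag hm]
  | cons c t ih =>
    intro res b? frag hm
    have hkf : pvKeep frag.reverse = false := by
      match b? with
      | some b => exact pv_keep_rev_false_of_some frag hm.2.1 hm.2.2
      | none => exact pv_keep_rev_false_of_none frag hm
    rw [List.flatMap_cons, List.foldl_cons]
    by_cases h1 : c = '('
    · subst h1
      have : oldStep (res, b?) '(' = (res, some ['(']) := by
        match b? with
        | some b => simp [oldStep]
        | none => simp [oldStep]
      rw [this, show pvT '(' = ['*', '('] from rfl, List.cons_append, List.cons_append,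
        List.nil_append]
      rw [show pvSplit1 frag ('*' :: '(' :: t.flatMap pvT)
            = frag.reverse :: pvSplit1 ['('] (t.flatMap pvT) by
        simp [pvSplit1]]
      rw [List.filter_cons, hkf]
      simpa using ih res (some ['(']) ['('] (by simp [pvMatch])
    · by_cases h2 : c = ')'
      · subst h2
        rw [show pvT ')' = [')', '*'] from rfl, List.cons_append, List.cons_append,
          List.nil_append]
        rw [show pvSplit1 frag (')' :: '*' :: t.flatMap pvT)
              = (')' :: frag).reverse :: pvSplit1 [] (t.flatMap pvT) by
          simp [pvSplit1]]
        match b? with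
        | some b =>
          obtain ⟨hf, hgl, hhd⟩ := hm
          have hfrne : frag ≠ [] := by
            intro h; rw [h] at hgl; simp at hgl
          have hkeep : pvKeep ((')' :: frag).reverse) = true := by
            rw [pv_keep_iff]
            constructor
            · rw [List.head?_reverse, pv_gl_cons]
              simpa [List.isEmpty_iff, hfrne] using hgl
            · simp [List.getLast?_reverse]
          have hstep : oldStep (res, some b) ')'
              = (res ++ [String.ofList (b ++ [')'])], none) := by
            simp [oldStep]
          rw [hstep, List.filter_cons, hkeep]
          have hpiece : (')' :: frag).reverse = b ++ [')'] := by
            simp [hf]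
          rw [hpiece]
          simpa using ih (res ++ [String.ofList (b ++ [')'])]) none [] (by simp [pvMatch])
        | none =>
          have hkeep : pvKeep ((')' :: frag).reverse) = false := by
            rw [Bool.eq_false_iff]
            intro hk
            rw [pv_keep_iff] at hk
            have := hk.1
            rw [List.head?_reverse, pv_gl_cons] at this
            by_cases hfr : frag = []
            · simp [hfr] at this
            · rw [if_neg (by simpa [List.isEmpty_iff] using hfr)] at this
              exact hm this
          have hstep : oldStep (res, none) ')' = (res, none) := by
            simp [oldStep]
          rw [hstep, List.filter_cons, hkeep]
          simpa using ih res none [] (by simp [pvMatch])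
      · by_cases h3 : c = '*'
        · subst h3
          rw [show pvT '*' = ['*'] from rfl, List.cons_append, List.nil_append]
          rw [show pvSplit1 frag ('*' :: t.flatMap pvT)
                = frag.reverse :: pvSplit1 [] (t.flatMap pvT) by
            simp [pvSplit1]]
          have hstep : oldStep (res, b?) '*' = (res, none) := by
            match b? with
            | some b => simp [oldStep]
            | none => simp [oldStep]
          rw [hstep, List.filter_cons, hkf]
          simpa using ih res none [] (by simp [pvMatch])
        · rw [show pvT c = [c] by simp [pvT, h1, h2], List.cons_append, List.nil_append]
          rw [show pvSplit1 frag (c :: t.flatMap pvT)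
                = pvSplit1 (c :: frag) (t.flatMap pvT) by
            simp [pvSplit1, h3]]
          match b? with
          | some b =>
            obtain ⟨hf, hgl, hhd⟩ := hm
            have hfrne : frag ≠ [] := by
              intro h; rw [h] at hgl; simp at hgl
            have hstep : oldStep (res, some b) c = (res, some (b ++ [c])) := by
              simp [oldStep, h1, h2, h3]
            rw [hstep]
            apply ih res (some (b ++ [c])) (c :: frag)
            refine ⟨by simp [hf], ?_, by simp [h2]⟩
            rw [pv_gl_cons, if_neg (by simpa [List.isEmpty_iff] using hfrne)]
            exact hgl
          | none =>
            have hstep : oldStep (res, none) c = (res, none) := by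
              simp [oldStep, h1, h2, h3]
            rw [hstep]
            apply ih res none (c :: frag)
            rw [pvMatch, pv_gl_cons]
            by_cases hfr : frag = []
            · simp [hfr, h1]
            · rw [if_neg (by simpa [List.isEmpty_iff] using hfr)]
              exact hm

-- ===== the simulation between the new scanner (B) and the old one (≡ A) =====

-- the divergence patterns, as decompositions of the remaining input
def pvPat (l : List Char) : Prop :=
  ∃ u m w, l = u ++ '(' :: (m ++ ')' :: w) ∧ '*' ∈ m ∧ '(' ∉ m ∧ ')' ∉ m
def pvCl (l : List Char) : Prop :=
  ∃ m w, l = m ++ ')' :: w ∧ '(' ∉ m ∧ ')' ∉ m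
def pvHd (l : List Char) : Prop :=
  ∃ m w, l = m ++ ')' :: w ∧ '*' ∈ m ∧ '(' ∉ m ∧ ')' ∉ m

lemma pvPat_cons (c : Char) {t : List Char} (h : pvPat t) : pvPat (c :: t) := by
  obtain ⟨u, m, w, he, hs, h1, h2⟩ := h
  exact ⟨c :: u, m, w, by simp [he], hs, h1, h2⟩

lemma pvHd_pat {t : List Char} (h : pvHd t) : pvPat ('(' :: t) := by
  obtain ⟨m, w, he, hs, h1, h2⟩ := h
  exact ⟨[], m, w, by simp [he], hs, h1, h2⟩

lemma pvCl_cons (c : Char) {t : List Char} (hc1 : c ≠ '(') (hc2 : c ≠ ')')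
    (h : pvCl t) : pvCl (c :: t) := by
  obtain ⟨m, w, he, h1, h2⟩ := h
  refine ⟨c :: m, w, by simp [he], ?_, ?_⟩
  · intro hmem
    rcases List.mem_cons.mp hmem with h | h
    · exact hc1 h.symm
    · exact h1 h
  · intro hmem
    rcases List.mem_cons.mp hmem with h | h
    · exact hc2 h.symm
    · exact h2 h

lemma pvHd_cons (c : Char) {t : List Char} (hc1 : c ≠ '(') (hc2 : c ≠ ')')
    (h : pvHd t) : pvHd (c :: t) := by
  obtain ⟨m, w, he, hs, h1, h2⟩ := h
  refine ⟨c :: m, w, by simp [he], by simp [hs], ?_, ?_⟩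
  · intro hmem
    rcases List.mem_cons.mp hmem with h | h
    · exact hc1 h.symm
    · exact h1 h
  · intro hmem
    rcases List.mem_cons.mp hmem with h | h
    · exact hc2 h.symm
    · exact h2 h

lemma pvCl_hd_star {t : List Char} (h : pvCl t) : pvHd ('*' :: t) := by
  obtain ⟨m, w, he, h1, h2⟩ := h
  exact ⟨'*' :: m, w, by simp [he], by simp, by simp [h1], by simp [h2]⟩

lemma pv_bp_open (res : List String) (b? : Option (List Char)) :
    bpStep (res, b?) '(' = (res, some ['(']) := by
  match b? with
  | some b => simp [bpStep]
  | none => simp [bpStep]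

lemma pv_old_open (res : List String) (b? : Option (List Char)) :
    oldStep (res, b?) '(' = (res, some ['(']) := by
  match b? with
  | some b => simp [oldStep]
  | none => simp [oldStep]

lemma pv_bp_close_some (res : List String) (b : List Char) :
    bpStep (res, some b) ')' = (res ++ [String.ofList (b ++ [')'])], none) := by
  simp [bpStep]

lemma pv_old_close_some (res : List String) (b : List Char) :
    oldStep (res, some b) ')' = (res ++ [String.ofList (b ++ [')'])], none) := by
  simp [oldStep]

lemma pv_bp_close_none (res : List String) :
    bpStep (res, none) ')' = (res, none) := by simp [bpStep]

lemma pv_old_close_none (res : List String) :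
    oldStep (res, none) ')' = (res, none) := by simp [oldStep]

lemma pv_bp_other_some (res : List String) (b : List Char) (c : Char)
    (h1 : c ≠ '(') (h2 : c ≠ ')') :
    bpStep (res, some b) c = (res, some (b ++ [c])) := by simp [bpStep, h1, h2]

lemma pv_bp_other_none (res : List String) (c : Char)
    (h1 : c ≠ '(') (h2 : c ≠ ')') :
    bpStep (res, none) c = (res, none) := by simp [bpStep, h1, h2]

lemma pv_old_star (res : List String) (b? : Option (List Char)) :
    oldStep (res, b?) '*' = (res, none) := by
  match b? with
  | some b => simp [oldStep]
  | none => simp [oldStep]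

lemma pv_old_other_some (res : List String) (b : List Char) (c : Char)
    (h1 : c ≠ '(') (h2 : c ≠ ')') (h3 : c ≠ '*') :
    oldStep (res, some b) c = (res, some (b ++ [c])) := by simp [oldStep, h1, h2, h3]

lemma pv_old_other_none (res : List String) (c : Char)
    (h1 : c ≠ '(') (h2 : c ≠ ')') (h3 : c ≠ '*') :
    oldStep (res, none) c = (res, none) := by simp [oldStep, h1, h2, h3]

lemma pv_sim (l : List Char) :
    (∀ res, ¬ pvPat l →
      (List.foldl bpStep (res, none) l).1 = (List.foldl oldStep (res, none) l).1)
  ∧ (∀ res b, ¬ pvPat l → ¬ pvHd l →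
      (List.foldl bpStep (res, some b) l).1 = (List.foldl oldStep (res, some b) l).1)
  ∧ (∀ res b, ¬ pvPat l → ¬ pvCl l →
      (List.foldl bpStep (res, some b) l).1 = (List.foldl oldStep (res, none) l).1) := by
  induction l with
  | nil => exact ⟨fun _ _ => rfl, fun _ _ _ _ => rfl, fun _ _ _ _ => rfl⟩
  | cons c t ih =>
    obtain ⟨ih1, ih2, ih3⟩ := ih
    by_cases h1 : c = '('
    · subst h1
      refine ⟨?_, ?_, ?_⟩
      · intro res hp
        rw [List.foldl_cons, List.foldl_cons, pv_bp_open, pv_old_open]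
        exact ih2 res ['('] (fun h => hp (pvPat_cons _ h)) (fun h => hp (pvHd_pat h))
      · intro res b hp _
        rw [List.foldl_cons, List.foldl_cons, pv_bp_open, pv_old_open]
        exact ih2 res ['('] (fun h => hp (pvPat_cons _ h)) (fun h => hp (pvHd_pat h))
      · intro res b hp _
        rw [List.foldl_cons, List.foldl_cons, pv_bp_open, pv_old_open]
        exact ih2 res ['('] (fun h => hp (pvPat_cons _ h)) (fun h => hp (pvHd_pat h))
    · by_cases h2 : c = ')'
      · subst h2
        refine ⟨?_, ?_, ?_⟩
        · intro res hp
          rw [List.foldl_cons, List.foldl_cons, pv_bp_close_none, pv_old_close_none]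
          exact ih1 res (fun h => hp (pvPat_cons _ h))
        · intro res b hp _
          rw [List.foldl_cons, List.foldl_cons, pv_bp_close_some, pv_old_close_some]
          exact ih1 (res ++ [String.ofList (b ++ [')'])]) (fun h => hp (pvPat_cons _ h))
        · intro res b _ hcl
          exact absurd ⟨[], t, by simp, by simp, by simp⟩ hcl
      · refine ⟨?_, ?_, ?_⟩
        · intro res hp
          by_cases h3 : c = '*'
          · subst h3
            rw [List.foldl_cons, List.foldl_cons,
              pv_bp_other_none res '*' (by decide) (by decide), pv_old_star]
            exact ih1 res (fun h => hp (pvPat_cons _ h))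
          · rw [List.foldl_cons, List.foldl_cons, pv_bp_other_none res c h1 h2,
              pv_old_other_none res c h1 h2 h3]
            exact ih1 res (fun h => hp (pvPat_cons _ h))
        · intro res b hp hhd
          by_cases h3 : c = '*'
          · subst h3
            rw [List.foldl_cons, List.foldl_cons,
              pv_bp_other_some res b '*' (by decide) (by decide), pv_old_star]
            exact ih3 res (b ++ ['*']) (fun h => hp (pvPat_cons _ h))
              (fun h => hhd (pvCl_hd_star h))
          · rw [List.foldl_cons, List.foldl_cons, pv_bp_other_some res b c h1 h2,
              pv_old_other_some res b c h1 h2 h3]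
            exact ih2 res (b ++ [c]) (fun h => hp (pvPat_cons _ h))
              (fun h => hhd (pvHd_cons c h1 h2 h))
        · intro res b hp hcl
          by_cases h3 : c = '*'
          · subst h3
            rw [List.foldl_cons, List.foldl_cons,
              pv_bp_other_some res b '*' (by decide) (by decide), pv_old_star]
            exact ih3 res (b ++ ['*']) (fun h => hp (pvPat_cons _ h))
              (fun h => hcl (pvCl_cons '*' (by decide) (by decide) h))
          · rw [List.foldl_cons, List.foldl_cons, pv_bp_other_some res b c h1 h2,
              pv_old_other_none res c h1 h2 h3]
            exact ih3 res (b ++ [c]) (fun h => hp (pvPat_cons _ h))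
              (fun h => hcl (pvCl_cons c h1 h2 h))

-- getD as head of drop
lemma pv_getD_drop (l : List Char) (i : Nat) :
    l.getD i ' ' = (l.drop i).headD ' ' := by
  induction l generalizing i with
  | nil => simp
  | cons a t ih => cases i <;> simp only [List.getD_cons_zero, List.getD_cons_succ,
      List.drop_succ_cons, List.drop_zero, List.headD_cons, ih]

-- the decomposition pattern implies the index-form pattern that Pre_ forbids
lemma pv_pat_to_idx (s : String) (h : pvPat s.toList) :
    ∃ k < s.toList.length, ∃ i < k,
      s.toList.getD i ' ' = '(' ∧ s.toList.getD k ' ' = ')' ∧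
      '*' ∈ (s.toList.drop (i+1)).take (k-i-1) ∧
      '(' ∉ (s.toList.drop (i+1)).take (k-i-1) ∧
      ')' ∉ (s.toList.drop (i+1)).take (k-i-1) := by
  obtain ⟨u, m, w, he, hs, h1, h2⟩ := h
  have hdrop : s.toList.drop (u.length + 1) = m ++ ')' :: w := by
    rw [he, show u ++ '(' :: (m ++ ')' :: w) = (u ++ ['(']) ++ (m ++ ')' :: w) by simp,
      show u.length + 1 = (u ++ ['(']).length by simp]
    exact List.drop_left
  have htake : (s.toList.drop (u.length + 1)).take
      (u.length + 1 + m.length - u.length - 1) = m := by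
    rw [hdrop, show u.length + 1 + m.length - u.length - 1 = m.length from by omega]
    exact List.take_left
  refine ⟨u.length + 1 + m.length, ?_, u.length, by omega, ?_, ?_, ?_, ?_, ?_⟩
  · rw [he]; simp; omega
  · rw [pv_getD_drop, he, List.drop_left]; rfl
  · rw [pv_getD_drop,
      show u.length + 1 + m.length = ((u ++ '(' :: m) : List Char).length from by
        simp; omega,
      he, show u ++ '(' :: (m ++ ')' :: w) = (u ++ '(' :: m) ++ ')' :: w by simp,
      List.drop_left]
    rfl
  · rw [htake]; exact hs
  · rw [htake]; exact h1
  · rw [htake]; exact h2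

-- ===== VERDICT (by name: the statement is the Claim_ definition above) =====
theorem between_parens_spec : Claim_equal_between_parens := by
  intro s _ hpre
  have hp : ¬ pvPat s.toList := fun h => hpre (pv_pat_to_idx s h)
  have hA : between_parens s = (s.toList.foldl oldStep ([], none)).1 := by
    rw [pv_a_char s]
    simpa using pv_main s.toList [] none [] (by simp [pvMatch])
  show between_parens s = between_parens_alt s
  unfold between_parens_alt
  rw [hA]
  exact ((pv_sim s.toList).1 [] hp).symm
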